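-- pv_equiv track=rewrite | github.com/Tipriest/algorithm_practice | leetcode/simulation/lcp17.py | calculate
-- ===== SOURCE A (Python) =====
-- def calculate(s: str) -> int:
--     x: int = 1
--     y: int = 0
--     for ch in s:
--         if "A" == ch:
--             x = 2 * x + y
--         else:
--             y = 2 * y + x
--     return x + y
-- ===== SOURCE B (Python) =====
-- def calculate(s: str) -> int:
--     return 2 ** len(s)
-- ===== Notes on version B (the rewrite author's own statement) =====
-- stated objective: faster
-- what changed: Replaced the per-character counter simulation with the closed form 2**len(s), since each step doubles x+y and the initial sum is 1.
import Mathlib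
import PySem

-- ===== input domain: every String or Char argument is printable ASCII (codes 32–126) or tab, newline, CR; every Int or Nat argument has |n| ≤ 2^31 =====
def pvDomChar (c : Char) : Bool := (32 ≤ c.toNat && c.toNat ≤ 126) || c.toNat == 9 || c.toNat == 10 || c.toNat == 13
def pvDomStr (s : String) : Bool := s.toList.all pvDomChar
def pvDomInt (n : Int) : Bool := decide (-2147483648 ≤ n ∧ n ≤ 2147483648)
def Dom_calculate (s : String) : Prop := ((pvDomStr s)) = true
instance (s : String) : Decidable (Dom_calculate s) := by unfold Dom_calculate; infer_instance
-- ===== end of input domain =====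

-- B replaces A's per-character (x,y) simulation by the closed form 2^len(s): each step doubles x+y, starting from 1. (faster)

-- ===== PORT A =====
def calculate (s : String) : Int :=
  let p := s.toList.foldl
    (fun (st : Int × Int) ch =>
      if 'A' = ch then (2 * st.1 + st.2, st.2) else (st.1, 2 * st.2 + st.1))
    (1, 0)
  p.1 + p.2

-- ===== PORT B =====
def calculate_alt (s : String) : Int := 2 ^ (PySem.Str.len s).toNat

-- ===== PRECONDITION & SPEC =====
def Spec_calculate (s : String) (out : Int) : Prop := out = calculate_alt s
instance (s : String) (out : Int) : Decidable (Spec_calculate s out) := by unfold Spec_calculate; infer_instance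

-- ===== CLAIM (what is proved, stated in full; the proofs are below) =====
def Claim_equal_calculate : Prop := ∀ (s : String), Dom_calculate s → Spec_calculate s (calculate s)

-- ===== LEMMAS AND PROOFS =====

-- loop invariant: the fold's final x+y is (x+y)·2^length
theorem calculate_fold_sum (l : List Char) (x y : Int) :
    ((l.foldl
      (fun (st : Int × Int) ch =>
        if 'A' = ch then (2 * st.1 + st.2, st.2) else (st.1, 2 * st.2 + st.1))
      (x, y)).1 +
     (l.foldl
      (fun (st : Int × Int) ch =>
        if 'A' = ch then (2 * st.1 + st.2, st.2) else (st.1, 2 * st.2 + st.1))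
      (x, y)).2) = (x + y) * 2 ^ l.length := by
  induction l generalizing x y with
  | nil => simp
  | cons c t ih =>
    simp only [List.foldl_cons, List.length_cons]
    by_cases h : 'A' = c
    · simp only [if_pos h]
      rw [ih]; ring
    · simp only [if_neg h]
      rw [ih]; ring

-- ===== VERDICT (by name: the statement is the Claim_ definition above) =====
theorem calculate_spec : Claim_equal_calculate := by
  intro s _
  unfold Spec_calculate calculate calculate_alt
  simp only []
  rw [calculate_fold_sum]
  simp [PySem.Str.len]
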